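-- pv_equiv track=rewrite | github.com/Deepthi1111/SoftwareDevelopment | maximizeExpression.py | evaluateMaximumValueOfThisFixedExpression
-- ===== SOURCE A (Python) =====
-- def evaluateMaximumValueOfThisFixedExpression(array):
--     A = [None] * len(array)
--     AminusB = [None] * len(array)
--     AminusBplusC = [None] * len(array)
--     AminusBplusCminusD = [None] * len(array)
--
--     A[0] = array[0]
--     for i in range(1, len(array)):
--         A[i] = max(array[i], A[i - 1])
--
--     AminusB[1] = A[0] - array[1]
--     for i in range(2, len(array)):
--         AminusB[i] = max(AminusB[i - 1], A[i - 1] - array[i])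
--
--     AminusBplusC[2] = AminusB[1] + array[2]
--     for i in range(3, len(array)):
--         AminusBplusC[i] = max(AminusBplusC[i - 1], AminusB[i - 1] + array[i])
--
--     AminusBplusCminusD[3] = AminusBplusC[2] - array[3]
--     for i in range(4, len(array)):
--         AminusBplusCminusD[i] = max(AminusBplusCminusD[i-1], AminusBplusC[i-1] - array[i])
--
--     return AminusBplusCminusD[-1]
-- ===== SOURCE B (Python) =====
-- def evaluateMaximumValueOfThisFixedExpression(array):
--     # one fused pass with four running scalars instead of four O(n) arrays and four loops
--     maxA = array[0]
--     maxAB = maxABC = maxABCD = None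
--     for i in range(1, len(array)):
--         x = array[i]
--         if maxABC is not None:
--             maxABCD = maxABC - x if maxABCD is None else max(maxABCD, maxABC - x)
--         if maxAB is not None:
--             maxABC = maxAB + x if maxABC is None else max(maxABC, maxAB + x)
--         maxAB = maxA - x if maxAB is None else max(maxAB, maxA - x)
--         maxA = max(maxA, x)
--     return maxABCD
-- ===== Notes on version B (the rewrite author's own statement) =====
-- stated objective: simpler
-- what changed: Replaces the four O(n) scratch arrays and four sequential index loops by a single fused pass keeping four running scalars (staged with None until each becomes defined), with O(1) extra space.
import Mathlib
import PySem

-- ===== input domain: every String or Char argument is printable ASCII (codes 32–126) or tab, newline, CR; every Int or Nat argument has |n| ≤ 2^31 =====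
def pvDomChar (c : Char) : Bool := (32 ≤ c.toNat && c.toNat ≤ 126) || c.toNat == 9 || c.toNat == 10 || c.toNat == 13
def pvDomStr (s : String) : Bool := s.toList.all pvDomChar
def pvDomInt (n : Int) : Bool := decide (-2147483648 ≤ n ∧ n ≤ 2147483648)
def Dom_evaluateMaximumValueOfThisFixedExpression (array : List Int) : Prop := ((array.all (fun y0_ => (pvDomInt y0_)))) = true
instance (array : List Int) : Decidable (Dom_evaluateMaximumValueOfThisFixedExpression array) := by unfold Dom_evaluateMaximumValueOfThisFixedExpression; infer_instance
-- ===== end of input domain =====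

-- B fuses A's four scratch arrays / four loops into one pass with four running scalars (O(1) space); equal return values on lists of length ≥ 4.

-- ===== PORT A =====
-- array[i] (in-range under Pre_; the loops only touch in-range indices)
def pvIntAt (xs : List Int) (i : Int) : Int := (PySem.List.pyGet? xs i).getD 0
-- reading a (filled) cell of one of A's Option-valued scratch arrays
def pvOptAt (xs : List (Option Int)) (i : Int) : Int := ((PySem.List.pyGet? xs i).getD none).getD 0

-- A = [None]*n; A[0] = array[0]; for i in range(1, n): A[i] = max(array[i], A[i-1])
def pvListA (array : List Int) : List (Option Int) :=
  (PySem.List.pyRange 1 array.length 1).foldl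
    (fun acc i => acc.set i.toNat (some (max (pvIntAt array i) (pvOptAt acc (i - 1)))))
    ((List.replicate array.length (none : Option Int)).set 0 (some (pvIntAt array 0)))

-- AminusB[1] = A[0] - array[1]; for i in range(2, n): AminusB[i] = max(AminusB[i-1], A[i-1] - array[i])
def pvListAB (array : List Int) : List (Option Int) :=
  (PySem.List.pyRange 2 array.length 1).foldl
    (fun acc i => acc.set i.toNat (some (max (pvOptAt acc (i - 1)) (pvOptAt (pvListA array) (i - 1) - pvIntAt array i))))
    ((List.replicate array.length (none : Option Int)).set 1 (some (pvOptAt (pvListA array) 0 - pvIntAt array 1)))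

-- AminusBplusC[2] = AminusB[1] + array[2]; for i in range(3, n): …
def pvListABC (array : List Int) : List (Option Int) :=
  (PySem.List.pyRange 3 array.length 1).foldl
    (fun acc i => acc.set i.toNat (some (max (pvOptAt acc (i - 1)) (pvOptAt (pvListAB array) (i - 1) + pvIntAt array i))))
    ((List.replicate array.length (none : Option Int)).set 2 (some (pvOptAt (pvListAB array) 1 + pvIntAt array 2)))

-- AminusBplusCminusD[3] = AminusBplusC[2] - array[3]; for i in range(4, n): …
def pvListABCD (array : List Int) : List (Option Int) :=
  (PySem.List.pyRange 4 array.length 1).foldl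
    (fun acc i => acc.set i.toNat (some (max (pvOptAt acc (i - 1)) (pvOptAt (pvListABC array) (i - 1) - pvIntAt array i))))
    ((List.replicate array.length (none : Option Int)).set 3 (some (pvOptAt (pvListABC array) 2 - pvIntAt array 3)))

-- return AminusBplusCminusD[-1]
def evaluateMaximumValueOfThisFixedExpression (array : List Int) : Int :=
  pvOptAt (pvListABCD array) (-1)

-- ===== PORT B =====
-- the body of B's single fused loop: one iteration updating the four running scalars
def pvAltStep (array : List Int) (s : Int × Option Int × Option Int × Option Int) (i : Int) :
    Int × Option Int × Option Int × Option Int :=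
  let x := pvIntAt array i
  let mA := s.1
  let mAB := s.2.1
  let mABC := s.2.2.1
  let mABCD := s.2.2.2
  let mABCD' := match mABC with
    | none => mABCD
    | some c => some (match mABCD with | none => c - x | some d => max d (c - x))
  let mABC' := match mAB with
    | none => mABC
    | some b => some (match mABC with | none => b + x | some c => max c (b + x))
  let mAB' := some (match mAB with | none => mA - x | some b => max b (mA - x))
  (max mA x, mAB', mABC', mABCD')

def evaluateMaximumValueOfThisFixedExpression_alt (array : List Int) : Int :=
  ((PySem.List.pyRange 1 array.length 1).foldl (pvAltStep array)
    (pvIntAt array 0, none, none, none)).2.2.2.getD 0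

-- ===== PRECONDITION & SPEC =====
-- Pre_ excludes lists of length < 4, on which A raises IndexError (it unconditionally indexes array[0..3]).
def Pre_evaluateMaximumValueOfThisFixedExpression (array : List Int) : Prop := 4 ≤ array.length
instance (array : List Int) : Decidable (Pre_evaluateMaximumValueOfThisFixedExpression array) := by unfold Pre_evaluateMaximumValueOfThisFixedExpression; infer_instance
def pvWitness_evaluateMaximumValueOfThisFixedExpression : List Int := [3, -1, 4, -1, 5]

def Spec_evaluateMaximumValueOfThisFixedExpression (array : List Int) (out : Int) : Prop := out = evaluateMaximumValueOfThisFixedExpression_alt array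
instance (array : List Int) (out : Int) : Decidable (Spec_evaluateMaximumValueOfThisFixedExpression array out) := by unfold Spec_evaluateMaximumValueOfThisFixedExpression; infer_instance

-- ===== CLAIM (what is proved, stated in full; the proofs are below) =====
def Claim_equal_evaluateMaximumValueOfThisFixedExpression : Prop := ∀ (array : List Int), Dom_evaluateMaximumValueOfThisFixedExpression array → Pre_evaluateMaximumValueOfThisFixedExpression array → Spec_evaluateMaximumValueOfThisFixedExpression array (evaluateMaximumValueOfThisFixedExpression array)

-- ===== LEMMAS AND PROOFS =====

-- array[j] for a Nat index
def pvA (array : List Int) (j : Nat) : Int := pvIntAt array (j : Int)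

-- the four DP recurrences, as pure functions of the index
def pvFA (array : List Int) : Nat → Int
  | 0 => pvA array 0
  | i + 1 => max (pvA array (i + 1)) (pvFA array i)

def pvFAB (array : List Int) : Nat → Int
  | 0 => 0
  | 1 => pvFA array 0 - pvA array 1
  | i + 2 => max (pvFAB array (i + 1)) (pvFA array (i + 1) - pvA array (i + 2))

def pvFABC (array : List Int) : Nat → Int
  | 0 => 0
  | 1 => 0
  | 2 => pvFAB array 1 + pvA array 2
  | i + 3 => max (pvFABC array (i + 2)) (pvFAB array (i + 2) + pvA array (i + 3))

def pvFABCD (array : List Int) : Nat → Int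
  | 0 => 0
  | 1 => 0
  | 2 => 0
  | 3 => pvFABC array 2 - pvA array 3
  | i + 4 => max (pvFABCD array (i + 3)) (pvFABC array (i + 3) - pvA array (i + 4))


theorem pvFA_succ (array : List Int) (m : Nat) (h : 1 ≤ m) :
    pvFA array m = max (pvA array m) (pvFA array (m - 1)) := by
  match m, h with
  | (k + 1), _ => rfl

theorem pvFAB_succ (array : List Int) (m : Nat) (h : 2 ≤ m) :
    pvFAB array m = max (pvFAB array (m - 1)) (pvFA array (m - 1) - pvA array m) := by
  match m, h with
  | (k + 2), _ => rfl

theorem pvFABC_succ (array : List Int) (m : Nat) (h : 3 ≤ m) :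
    pvFABC array m = max (pvFABC array (m - 1)) (pvFAB array (m - 1) + pvA array m) := by
  match m, h with
  | (k + 3), _ => rfl

theorem pvFABCD_succ (array : List Int) (m : Nat) (h : 4 ≤ m) :
    pvFABCD array m = max (pvFABCD array (m - 1)) (pvFABC array (m - 1) - pvA array m) := by
  match m, h with
  | (k + 4), _ => rfl

-- generic characterization of A's fill-one-array loops
theorem pv_build_fold
    (n s : Nat)
    (step : List (Option Int) → Int → List (Option Int))
    (v : Nat → Int → Int) (w : Nat → Int)
    (hstep : ∀ (acc : List (Option Int)) (i : Nat), s + 1 ≤ i → i < n →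
      step acc (i : Int) = acc.set i (some (v i (pvOptAt acc ((i : Int) - 1)))))
    (hrec : ∀ j : Nat, s ≤ j → j + 1 < n → w (j + 1) = v (j + 1) (w j))
    (init : List (Option Int)) (hlen : init.length = n)
    (hinit : ∀ j : Nat, j < n → init[j]? = some (if j = s then some (w s) else none)) :
    ∀ m : Nat, s + 1 ≤ m → m ≤ n →
      ((PySem.List.pyRange ((s : Int) + 1) (m : Int) 1).foldl step init).length = n ∧
      ∀ j : Nat, j < n →
        ((PySem.List.pyRange ((s : Int) + 1) (m : Int) 1).foldl step init)[j]? =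
          some (if s ≤ j ∧ j < m then some (w j) else none) := by
  intro m
  induction m with
  | zero => omega
  | succ m ih =>
    intro hm1 hm2
    by_cases hbase : m = s
    · have : PySem.List.pyRange ((s : Int) + 1) ((m + 1 : Nat) : Int) 1 = [] := by
        apply PySem.List.pyRange_one_eq_nil; push_cast; omega
      rw [this]
      simp only [List.foldl_nil]
      refine ⟨hlen, fun j hj => ?_⟩
      rw [hinit j hj]
      congr 1
      by_cases hjs : j = s
      · rw [if_pos hjs, if_pos (by omega), hjs]
      · rw [if_neg hjs, if_neg (by omega)]
    · have hm1' : s + 1 ≤ m := by omega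
      have hm2' : m ≤ n := by omega
      obtain ⟨ihlen, ihget⟩ := ih hm1' hm2'
      have hsplit : PySem.List.pyRange ((s : Int) + 1) ((m + 1 : Nat) : Int) 1 =
          PySem.List.pyRange ((s : Int) + 1) (m : Int) 1 ++ [(m : Int)] := by
        push_cast
        exact PySem.List.pyRange_one_succ_right (by omega)
      rw [hsplit, List.foldl_append, List.foldl_cons, List.foldl_nil]
      set L := (PySem.List.pyRange ((s : Int) + 1) (m : Int) 1).foldl step init with hL
      have hprev : pvOptAt L ((m : Int) - 1) = w (m - 1) := by
        have hidx : ((m : Int) - 1) = ((m - 1 : Nat) : Int) := by push_cast; omega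
        have hget : L[(m - 1 : Nat)]? = some (some (w (m - 1))) := by
          rw [ihget (m - 1) (by omega)]
          simp only [if_pos (by omega : s ≤ m - 1 ∧ m - 1 < m)]
        unfold pvOptAt
        rw [hidx, PySem.List.pyGet?_natCast, hget]
        rfl
      rw [hstep L m hm1' (by omega), hprev]
      have hwm : v m (w (m - 1)) = w m := by
        have := hrec (m - 1) (by omega) (by omega)
        rw [show m - 1 + 1 = m from by omega] at this
        exact this.symm
      rw [hwm]
      refine ⟨by simp [ihlen], fun j hj => ?_⟩
      rw [List.getElem?_set]
      by_cases hjm : j = m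
      · subst hjm
        simp [ihlen, hj]
        omega
      · rw [if_neg (by omega), ihget j hj]
        congr 1
        by_cases h1 : s ≤ j ∧ j < m
        · rw [if_pos h1, if_pos ⟨h1.1, by omega⟩]
        · rw [if_neg h1, if_neg (by omega)]

theorem pvListA_get (array : List Int) (_h : 4 ≤ array.length) :
    ∀ j : Nat, j < array.length → (pvListA array)[j]? = some (some (pvFA array j)) := by
  have := pv_build_fold array.length 0
    (fun acc i => acc.set i.toNat (some (max (pvIntAt array i) (pvOptAt acc (i - 1)))))
    (fun i p => max (pvA array i) p) (pvFA array)
    (by intro acc i hi1 hi2; simp only; rw [Int.toNat_natCast]; rfl)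
    (by intro j hj1 hj2; rfl)
    ((List.replicate array.length (none : Option Int)).set 0 (some (pvIntAt array 0)))
    (by simp)
    (by
      intro j hj
      rw [List.getElem?_set]
      by_cases hj0 : j = 0
      · subst hj0; simp [hj]; rfl
      · rw [if_neg (Ne.symm hj0)]
        simp [hj, hj0])
    array.length (by omega) (le_refl _)
  intro j hj
  have h2 := this.2 j hj
  rw [show ((0 : Nat) : Int) + 1 = 1 from by norm_num] at h2
  unfold pvListA
  rw [h2, if_pos ⟨Nat.zero_le _, hj⟩]

theorem pvListAB_get (array : List Int) (h : 4 ≤ array.length) :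
    ∀ j : Nat, 1 ≤ j → j < array.length → (pvListAB array)[j]? = some (some (pvFAB array j)) := by
  have := pv_build_fold array.length 1
    (fun acc i => acc.set i.toNat (some (max (pvOptAt acc (i - 1)) (pvOptAt (pvListA array) (i - 1) - pvIntAt array i))))
    (fun i p => max p (pvFA array (i - 1) - pvA array i)) (pvFAB array)
    (by
      intro acc i hi1 hi2
      simp only
      rw [Int.toNat_natCast]
      have hA : pvOptAt (pvListA array) ((i : Int) - 1) = pvFA array (i - 1) := by
        have hidx : ((i : Int) - 1) = ((i - 1 : Nat) : Int) := by push_cast; omega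
        unfold pvOptAt
        rw [hidx, PySem.List.pyGet?_natCast, pvListA_get array h (i - 1) (by omega)]
        rfl
      rw [hA]; rfl)
    (by
      intro j hj1 hj2
      rw [pvFAB_succ array (j + 1) (by omega)]
      rfl)
    ((List.replicate array.length (none : Option Int)).set 1 (some (pvOptAt (pvListA array) 0 - pvIntAt array 1)))
    (by simp)
    (by
      intro j hj
      rw [List.getElem?_set]
      by_cases hj1 : j = 1
      · subst hj1
        simp [hj]
        have hA0 : pvOptAt (pvListA array) 0 = pvFA array 0 := by
          unfold pvOptAt
          rw [show (0 : Int) = ((0 : Nat) : Int) from rfl, PySem.List.pyGet?_natCast,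
            pvListA_get array h 0 (by omega)]
          rfl
        rw [hA0]; rfl
      · rw [if_neg (Ne.symm hj1)]
        simp [hj, hj1])
    array.length (by omega) (le_refl _)
  intro j hj0 hj
  have h2 := this.2 j hj
  rw [show ((1 : Nat) : Int) + 1 = 2 from by norm_num] at h2
  unfold pvListAB
  rw [h2, if_pos ⟨hj0, hj⟩]

theorem pvListABC_get (array : List Int) (h : 4 ≤ array.length) :
    ∀ j : Nat, 2 ≤ j → j < array.length → (pvListABC array)[j]? = some (some (pvFABC array j)) := by
  have := pv_build_fold array.length 2
    (fun acc i => acc.set i.toNat (some (max (pvOptAt acc (i - 1)) (pvOptAt (pvListAB array) (i - 1) + pvIntAt array i))))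
    (fun i p => max p (pvFAB array (i - 1) + pvA array i)) (pvFABC array)
    (by
      intro acc i hi1 hi2
      simp only
      rw [Int.toNat_natCast]
      have hAB : pvOptAt (pvListAB array) ((i : Int) - 1) = pvFAB array (i - 1) := by
        have hidx : ((i : Int) - 1) = ((i - 1 : Nat) : Int) := by push_cast; omega
        unfold pvOptAt
        rw [hidx, PySem.List.pyGet?_natCast, pvListAB_get array h (i - 1) (by omega) (by omega)]
        rfl
      rw [hAB]; rfl)
    (by
      intro j hj1 hj2
      rw [pvFABC_succ array (j + 1) (by omega)]
      rfl)
    ((List.replicate array.length (none : Option Int)).set 2 (some (pvOptAt (pvListAB array) 1 + pvIntAt array 2)))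
    (by simp)
    (by
      intro j hj
      rw [List.getElem?_set]
      by_cases hj2 : j = 2
      · subst hj2
        simp [hj]
        have hAB1 : pvOptAt (pvListAB array) 1 = pvFAB array 1 := by
          unfold pvOptAt
          rw [show (1 : Int) = ((1 : Nat) : Int) from rfl, PySem.List.pyGet?_natCast,
            pvListAB_get array h 1 (le_refl _) (by omega)]
          rfl
        rw [hAB1]; rfl
      · rw [if_neg (Ne.symm hj2)]
        simp [hj, hj2])
    array.length (by omega) (le_refl _)
  intro j hj0 hj
  have h2 := this.2 j hj
  rw [show ((2 : Nat) : Int) + 1 = 3 from by norm_num] at h2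
  unfold pvListABC
  rw [h2, if_pos ⟨hj0, hj⟩]

theorem pvListABCD_facts (array : List Int) (h : 4 ≤ array.length) :
    (pvListABCD array).length = array.length ∧
    ∀ j : Nat, 3 ≤ j → j < array.length → (pvListABCD array)[j]? = some (some (pvFABCD array j)) := by
  have := pv_build_fold array.length 3
    (fun acc i => acc.set i.toNat (some (max (pvOptAt acc (i - 1)) (pvOptAt (pvListABC array) (i - 1) - pvIntAt array i))))
    (fun i p => max p (pvFABC array (i - 1) - pvA array i)) (pvFABCD array)
    (by
      intro acc i hi1 hi2
      simp only
      rw [Int.toNat_natCast]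
      have hABC : pvOptAt (pvListABC array) ((i : Int) - 1) = pvFABC array (i - 1) := by
        have hidx : ((i : Int) - 1) = ((i - 1 : Nat) : Int) := by push_cast; omega
        unfold pvOptAt
        rw [hidx, PySem.List.pyGet?_natCast, pvListABC_get array h (i - 1) (by omega) (by omega)]
        rfl
      rw [hABC]; rfl)
    (by
      intro j hj1 hj2
      rw [pvFABCD_succ array (j + 1) (by omega)]
      rfl)
    ((List.replicate array.length (none : Option Int)).set 3 (some (pvOptAt (pvListABC array) 2 - pvIntAt array 3)))
    (by simp)
    (by
      intro j hj
      rw [List.getElem?_set]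
      by_cases hj3 : j = 3
      · subst hj3
        simp [hj]
        have hABC2 : pvOptAt (pvListABC array) 2 = pvFABC array 2 := by
          unfold pvOptAt
          rw [show (2 : Int) = ((2 : Nat) : Int) from rfl, PySem.List.pyGet?_natCast,
            pvListABC_get array h 2 (le_refl _) (by omega)]
          rfl
        rw [hABC2]; rfl
      · rw [if_neg (Ne.symm hj3)]
        simp [hj, hj3])
    array.length (by omega) (le_refl _)
  obtain ⟨hlen, hget⟩ := this
  rw [show ((3 : Nat) : Int) + 1 = 4 from by norm_num] at hlen hget
  refine ⟨hlen, fun j hj0 hj => ?_⟩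
  unfold pvListABCD
  rw [hget j hj, if_pos ⟨hj0, hj⟩]

-- A's return value equals pvFABCD at the last index
theorem portA_eq (array : List Int) (h : 4 ≤ array.length) :
    evaluateMaximumValueOfThisFixedExpression array = pvFABCD array (array.length - 1) := by
  obtain ⟨hlen, hget⟩ := pvListABCD_facts array h
  unfold evaluateMaximumValueOfThisFixedExpression pvOptAt
  rw [PySem.List.pyGet?_neg_one, List.getLast?_eq_getElem?, hlen,
    hget (array.length - 1) (by omega) (by omega)]
  rfl

-- B's fold state after processing indices 1..m-1
theorem altFold_state (array : List Int) (_h : 4 ≤ array.length) :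
    ∀ m : Nat, 1 ≤ m → m ≤ array.length →
      (PySem.List.pyRange 1 (m : Int) 1).foldl (pvAltStep array) (pvIntAt array 0, none, none, none) =
        (pvFA array (m - 1),
         if 2 ≤ m then some (pvFAB array (m - 1)) else none,
         if 3 ≤ m then some (pvFABC array (m - 1)) else none,
         if 4 ≤ m then some (pvFABCD array (m - 1)) else none) := by
  intro m
  induction m with
  | zero => omega
  | succ m ih =>
    intro _ hm2
    by_cases hbase : m = 0
    · subst hbase
      rw [show ((1 : Nat) : Int) = 1 from rfl, PySem.List.pyRange_one_eq_nil (le_refl _)]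
      simp [pvFA, pvA]
    · have hm1' : 1 ≤ m := by omega
      have hsplit : PySem.List.pyRange 1 ((m + 1 : Nat) : Int) 1 =
          PySem.List.pyRange 1 (m : Int) 1 ++ [(m : Int)] := by
        push_cast
        exact PySem.List.pyRange_one_succ_right (by push_cast; omega)
      rw [hsplit, List.foldl_append, List.foldl_cons, List.foldl_nil, ih hm1' (by omega)]
      have hx : pvIntAt array ((m : Int)) = pvA array m := rfl
      rw [show m + 1 - 1 = m from rfl]
      unfold pvAltStep
      simp only [hx]
      have hm' : m - 1 + 1 = m := by omega
      -- case split on how far the staging has progressed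
      rcases Nat.lt_or_ge m 2 with h2 | h2
      · have hm1 : m = 1 := by omega
        subst hm1
        simp [pvFA, pvFAB, max_comm]
      rcases Nat.lt_or_ge m 3 with h3 | h3
      · have hm2' : m = 2 := by omega
        subst hm2'
        simp [pvFA, pvFAB, pvFABC, max_comm, max_assoc]
      rcases Nat.lt_or_ge m 4 with h4 | h4
      · have hm3 : m = 3 := by omega
        subst hm3
        simp [pvFA, pvFAB, pvFABC, pvFABCD, max_comm, max_assoc]
      · simp only [if_pos h2, if_pos h3, if_pos (by omega : 4 ≤ m), if_pos (by omega : 2 ≤ m + 1),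
          if_pos (by omega : 3 ≤ m + 1), if_pos (by omega : 4 ≤ m + 1)]
        refine congrArg₂ Prod.mk ?_ (congrArg₂ Prod.mk ?_ (congrArg₂ Prod.mk ?_ ?_))
        · show max (pvFA array (m - 1)) (pvA array m) = pvFA array m
          rw [pvFA_succ array m (by omega)]
          exact max_comm _ _
        · show some (max (pvFAB array (m - 1)) (pvFA array (m - 1) - pvA array m)) = some (pvFAB array m)
          rw [pvFAB_succ array m (by omega)]
        · show some (max (pvFABC array (m - 1)) (pvFAB array (m - 1) + pvA array m)) = some (pvFABC array m)
          rw [pvFABC_succ array m (by omega)]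
        · show some (max (pvFABCD array (m - 1)) (pvFABC array (m - 1) - pvA array m)) = some (pvFABCD array m)
          rw [pvFABCD_succ array m (by omega)]

theorem portB_eq (array : List Int) (h : 4 ≤ array.length) :
    evaluateMaximumValueOfThisFixedExpression_alt array = pvFABCD array (array.length - 1) := by
  unfold evaluateMaximumValueOfThisFixedExpression_alt
  rw [altFold_state array h array.length (by omega) (le_refl _), if_pos h]
  rfl

-- ===== VERDICT (by name: the statement is the Claim_ definition above) =====
theorem evaluateMaximumValueOfThisFixedExpression_spec : Claim_equal_evaluateMaximumValueOfThisFixedExpression := by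
  intro array _ hpre
  unfold Spec_evaluateMaximumValueOfThisFixedExpression
  rw [portA_eq array hpre, portB_eq array hpre]
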